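-- pv_equiv track=rewrite | github.com/Tarmizibaki/forex-ai-dashboard | elliott_wave.py | label_elliott_wave
-- ===== SOURCE A (Python) =====
-- def label_elliott_wave(swings):
--     wave_labels = []
--     wave_count, mode = 1, "impulse"
--     for idx, _ in swings:
--         if wave_count <= 5 and mode == "impulse":
--             wave_labels.append((idx, f"Wave {wave_count}"))
--             wave_count += 1
--             if wave_count > 5:
--                 wave_count = 1
--                 mode = "correction"
--         elif mode == "correction":
--             wave_labels.append((idx, f"Wave {chr(64 + wave_count)}"))
--             wave_count += 1
--             if wave_count > 3:
--                 break
--     return wave_labels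
-- ===== SOURCE B (Python) =====
-- WAVE_LABELS = ["Wave 1", "Wave 2", "Wave 3", "Wave 4", "Wave 5",
--                "Wave A", "Wave B", "Wave C"]
--
-- def label_elliott_wave(swings):
--     return [(idx, lbl) for (idx, _), lbl in zip(swings, WAVE_LABELS)]
-- ===== Notes on version B (the rewrite author's own statement) =====
-- stated objective: simpler
-- what changed: Replaced the stateful wave_count/mode machine with its branches and break by a constant 8-element label table zipped positionally with the swings (zip truncates like the break).
import Mathlib
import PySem

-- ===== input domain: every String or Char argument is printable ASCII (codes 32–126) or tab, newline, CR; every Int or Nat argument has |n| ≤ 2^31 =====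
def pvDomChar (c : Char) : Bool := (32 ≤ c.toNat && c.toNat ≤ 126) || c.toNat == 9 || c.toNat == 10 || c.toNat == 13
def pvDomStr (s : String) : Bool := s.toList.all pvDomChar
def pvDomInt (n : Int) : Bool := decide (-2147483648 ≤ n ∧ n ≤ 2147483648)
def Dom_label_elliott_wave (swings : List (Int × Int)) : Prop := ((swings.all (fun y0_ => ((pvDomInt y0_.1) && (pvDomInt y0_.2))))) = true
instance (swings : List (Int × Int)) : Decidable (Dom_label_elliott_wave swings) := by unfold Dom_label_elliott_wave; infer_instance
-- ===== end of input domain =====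

-- B replaces A's stateful wave_count/mode machine by a constant 8-label table zipped with the swings (simpler).


-- ===== PORT A =====
-- literal transliteration of A's loop: state (wave_count, mode, accumulated labels); break returns the accumulator
def labelLoopA : List (Int × Int) → Int → String → List (Int × String) → List (Int × String)
  | [], _, _, acc => acc
  | (idx, _) :: rest, wave_count, mode, acc =>
    if wave_count ≤ 5 ∧ mode = "impulse" then
      let acc' := acc ++ [(idx, "Wave " ++ PySem.Int.toStr wave_count)]
      let wc' := wave_count + 1
      if wc' > 5 then labelLoopA rest 1 "correction" acc'
      else labelLoopA rest wc' mode acc'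
    else if mode = "correction" then
      -- chr(64 + wave_count): exact for 0 ≤ 64+wave_count (the reachable counts are 1..3)
      let acc' := acc ++ [(idx, "Wave " ++ String.ofList [Char.ofNat (64 + wave_count).toNat])]
      let wc' := wave_count + 1
      if wc' > 3 then acc'  -- break
      else labelLoopA rest wc' mode acc'
    else labelLoopA rest wave_count mode acc

def label_elliott_wave (swings : List (Int × Int)) : List (Int × String) :=
  labelLoopA swings 1 "impulse" []

-- ===== PORT B =====
def waveLabels : List String :=
  ["Wave 1", "Wave 2", "Wave 3", "Wave 4", "Wave 5", "Wave A", "Wave B", "Wave C"]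

def label_elliott_wave_alt (swings : List (Int × Int)) : List (Int × String) :=
  (swings.zip waveLabels).map (fun p => (p.1.1, p.2))

-- ===== PRECONDITION & SPEC =====
def Spec_label_elliott_wave (swings : List (Int × Int)) (out : List (Int × String)) : Prop := out = label_elliott_wave_alt swings
instance (swings : List (Int × Int)) (out : List (Int × String)) : Decidable (Spec_label_elliott_wave swings out) := by unfold Spec_label_elliott_wave; infer_instance

-- ===== CLAIM (what is proved, stated in full; the proofs are below) =====
def Claim_equal_label_elliott_wave : Prop := ∀ (swings : List (Int × Int)), Dom_label_elliott_wave swings → Spec_label_elliott_wave swings (label_elliott_wave swings)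

-- ===== LEMMAS AND PROOFS =====


-- ===== VERDICT (by name: the statement is the Claim_ definition above) =====
theorem label_elliott_wave_spec : Claim_equal_label_elliott_wave := by
  intro swings _
  unfold Spec_label_elliott_wave label_elliott_wave label_elliott_wave_alt waveLabels
  rcases swings with _ | ⟨a, _ | ⟨b, _ | ⟨c, _ | ⟨d, _ | ⟨e, _ | ⟨f, _ | ⟨g, _ | ⟨h, rest⟩⟩⟩⟩⟩⟩⟩⟩ <;>
    simp [labelLoopA] <;> decide
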